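-- pv_equiv track=rewrite | github.com/ronzim/wheresmymoney | src/wheresmymoney/sheet_writer.py | find_next_transaction_row
-- ===== SOURCE A (Python) =====
-- def find_next_transaction_row(
--     sheet_values: list[list[str]],
--     transaction_start_row: int,
--     write_mode: str,
-- ) -> int:
--     first_data_column = 1 if write_mode == "with_month_formula" else 0
--     last_non_empty_row = transaction_start_row - 1
--
--     for row_index in range(transaction_start_row, len(sheet_values) + 1):
--         row = sheet_values[row_index - 1]
--         relevant_cells = row[first_data_column:]
--         if any(cell.strip() for cell in relevant_cells if isinstance(cell, str)):
--             last_non_empty_row = row_index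
--
--     return last_non_empty_row + 1
-- ===== SOURCE B (Python) =====
-- def find_next_transaction_row(
--     sheet_values: list[list[str]],
--     transaction_start_row: int,
--     write_mode: str,
-- ) -> int:
--     first_data_column = 1 if write_mode == "with_month_formula" else 0
--     for row_index in range(len(sheet_values), transaction_start_row - 1, -1):
--         relevant_cells = sheet_values[row_index - 1][first_data_column:]
--         if any(cell.strip() for cell in relevant_cells if isinstance(cell, str)):
--             return row_index + 1
--     return transaction_start_row
-- ===== Notes on version B (the rewrite author's own statement) =====
-- stated objective: simpler
-- what changed: Replaces A's forward loop with a max-tracking accumulator by a backward scan from the last row that returns row_index + 1 at the first non-empty row (early exit), falling back to transaction_start_row.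
import Mathlib
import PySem

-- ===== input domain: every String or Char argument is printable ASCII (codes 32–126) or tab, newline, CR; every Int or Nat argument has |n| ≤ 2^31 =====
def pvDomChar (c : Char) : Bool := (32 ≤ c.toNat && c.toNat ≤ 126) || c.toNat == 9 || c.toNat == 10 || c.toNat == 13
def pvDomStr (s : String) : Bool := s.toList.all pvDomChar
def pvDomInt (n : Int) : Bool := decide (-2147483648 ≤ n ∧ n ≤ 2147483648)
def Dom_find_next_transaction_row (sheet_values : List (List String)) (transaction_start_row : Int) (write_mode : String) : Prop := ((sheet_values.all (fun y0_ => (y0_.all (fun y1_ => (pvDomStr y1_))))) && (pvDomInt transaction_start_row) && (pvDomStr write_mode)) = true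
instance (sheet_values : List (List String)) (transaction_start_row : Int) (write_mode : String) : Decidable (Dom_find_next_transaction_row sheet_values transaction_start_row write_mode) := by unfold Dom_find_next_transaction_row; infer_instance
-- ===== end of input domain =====

-- B replaces A's forward max-tracking accumulator with a backward early-exit scan (simpler decomposition, same cost).

-- shared helper: the row predicate 'any(cell.strip() for cell in row[first_data_column:])',
-- identical in both Pythons (isinstance(cell, str) is always true on list[list[str]])
def pvRowNonempty (sheet_values : List (List String)) (fdc : Int) (i : Int) : Bool :=
  (PySem.List.slice (PySem.List.pyGetD sheet_values (i - 1) []) (some fdc) none).any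
    (fun c => PySem.Str.strip c != "")

-- ===== PORT A =====
def find_next_transaction_row (sheet_values : List (List String)) (transaction_start_row : Int) (write_mode : String) : Int :=
  let first_data_column : Int := if write_mode == "with_month_formula" then 1 else 0
  let last_non_empty_row :=
    (PySem.List.pyRange transaction_start_row ((sheet_values.length : Int) + 1) 1).foldl
      (fun acc row_index =>
        if pvRowNonempty sheet_values first_data_column row_index then row_index else acc)
      (transaction_start_row - 1)
  last_non_empty_row + 1

-- ===== PORT B =====
def find_next_transaction_row_alt (sheet_values : List (List String)) (transaction_start_row : Int) (write_mode : String) : Int :=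
  let first_data_column : Int := if write_mode == "with_month_formula" then 1 else 0
  match (PySem.List.pyRange (sheet_values.length : Int) (transaction_start_row - 1) (-1)).find?
      (fun row_index => pvRowNonempty sheet_values first_data_column row_index) with
  | some row_index => row_index + 1
  | none => transaction_start_row

-- ===== PRECONDITION & SPEC =====
-- Pre_ excludes exactly the inputs where Python A raises an IndexError:
-- transaction_start_row ≤ -len(sheet_values) makes sheet_values[row_index - 1] go below -len.
def Pre_find_next_transaction_row (sheet_values : List (List String)) (transaction_start_row : Int) (write_mode : String) : Prop :=
  1 - (sheet_values.length : Int) ≤ transaction_start_row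
instance (sheet_values : List (List String)) (transaction_start_row : Int) (write_mode : String) : Decidable (Pre_find_next_transaction_row sheet_values transaction_start_row write_mode) := by unfold Pre_find_next_transaction_row; infer_instance
def pvWitness_find_next_transaction_row : List (List String) × Int × String := ([[""], ["a"]], 1, "append")

def Spec_find_next_transaction_row (sheet_values : List (List String)) (transaction_start_row : Int) (write_mode : String) (out : Int) : Prop := out = find_next_transaction_row_alt sheet_values transaction_start_row write_mode
instance (sheet_values : List (List String)) (transaction_start_row : Int) (write_mode : String) (out : Int) : Decidable (Spec_find_next_transaction_row sheet_values transaction_start_row write_mode out) := by unfold Spec_find_next_transaction_row; infer_instance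

-- ===== CLAIM (what is proved, stated in full; the proofs are below) =====
def Claim_equal_find_next_transaction_row : Prop := ∀ (sheet_values : List (List String)) (transaction_start_row : Int) (write_mode : String), Dom_find_next_transaction_row sheet_values transaction_start_row write_mode → Pre_find_next_transaction_row sheet_values transaction_start_row write_mode → Spec_find_next_transaction_row sheet_values transaction_start_row write_mode (find_next_transaction_row sheet_values transaction_start_row write_mode)

-- ===== LEMMAS AND PROOFS =====

-- A's accumulator loop computes the LAST element of the list satisfying p (default a),
-- which is the first element of the reversed list satisfying p.
theorem foldl_last_if_eq_find_reverse (p : Int → Bool) :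
    ∀ (l : List Int) (a : Int),
      l.foldl (fun acc i => if p i then i else acc) a = (l.reverse.find? p).getD a := by
  intro l
  induction l with
  | nil => intro a; simp
  | cons x xs ih =>
    intro a
    simp only [List.foldl_cons, List.reverse_cons, List.find?_append, ih]
    cases h : xs.reverse.find? p with
    | some y => simp
    | none => by_cases hp : p x <;> simp [hp]

-- ===== VERDICT (by name: the statement is the Claim_ definition above) =====
theorem find_next_transaction_row_spec : Claim_equal_find_next_transaction_row := by
  intro sv tsr wm _ _
  unfold Spec_find_next_transaction_row find_next_transaction_row find_next_transaction_row_alt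
  have hrev : PySem.List.pyRange (sv.length : Int) (tsr - 1) (-1)
      = (PySem.List.pyRange tsr ((sv.length : Int) + 1) 1).reverse := by
    rw [PySem.List.pyRange_neg_one_eq_reverse]
    norm_num
  simp only [hrev, foldl_last_if_eq_find_reverse]
  cases h : (PySem.List.pyRange tsr ((sv.length : Int) + 1) 1).reverse.find?
      (fun i => pvRowNonempty sv (if wm == "with_month_formula" then 1 else 0) i) with
  | some i => simp
  | none => simp
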